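-- pv_equiv track=rewrite | github.com/KlebbtheKlari/codebusters_texer | src/cipher_utils.py | baconify
-- ===== SOURCE A (Python) =====
-- def letter_to_num(x):
--     return (ord(x)-65)
--
-- def baconify(s):
--     ret = ''
--     a = letter_to_num(s)
--     if (a >= 9):
--         a -= 1
--     if (a >= 20):
--         a -= 1
--     for i in range(5):
--         ret += str(a%2)
--         a = a//2
--     return ret[::-1]
-- ===== SOURCE B (Python) =====
-- def letter_to_num(x):
--     return (ord(x)-65)
--
-- def baconify(s):
--     a = letter_to_num(s)
--     if (a >= 9):
--         a -= 1
--     if (a >= 20):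
--         a -= 1
--     return format(a % 32, '05b')
-- ===== Notes on version B (the rewrite author's own statement) =====
-- stated objective: simpler
-- what changed: Replaces the 5-iteration remainder/floor-division bit-accumulation loop and final string reversal with a single closed-form 5-bit binary formatting of a mod 32.
import Mathlib
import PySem

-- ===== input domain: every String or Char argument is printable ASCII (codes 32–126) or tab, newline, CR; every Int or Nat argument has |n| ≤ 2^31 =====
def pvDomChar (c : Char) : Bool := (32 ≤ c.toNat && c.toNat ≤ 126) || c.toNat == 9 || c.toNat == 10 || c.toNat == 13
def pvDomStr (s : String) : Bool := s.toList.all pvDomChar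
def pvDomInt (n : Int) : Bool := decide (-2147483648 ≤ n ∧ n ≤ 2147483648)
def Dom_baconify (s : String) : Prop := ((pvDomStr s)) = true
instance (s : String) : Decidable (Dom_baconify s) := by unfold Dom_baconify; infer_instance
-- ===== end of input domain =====

-- B replaces A's 5-step %2//2 loop and reversal by a closed-form 5-bit formatting of a % 32 (simpler).

-- ===== PORT A =====
def baconify (s : String) : String :=
  match s.toList with
  | [c] =>
    -- a = letter_to_num(s) = ord(s) - 65
    let a0 : Int := (c.toNat : Int) - 65
    let a1 : Int := if a0 ≥ 9 then a0 - 1 else a0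
    let a2 : Int := if a1 ≥ 20 then a1 - 1 else a1
    -- for i in range(5): ret += str(a%2); a = a//2
    let st := (List.range 5).foldl
      (fun (st : List Char × Int) _ =>
        (st.1 ++ (PySem.Int.toStr (PySem.Int.mod st.2 2)).toList,
         PySem.Int.floordiv st.2 2)) ([], a2)
    -- return ret[::-1]
    String.mk st.1.reverse
  | _ => ""   -- ord raises TypeError unless len(s) == 1; excluded by Pre_

-- ===== PORT B =====
def baconify_alt (s : String) : String :=
  if s.toList.length = 1 then
    let c : Char := s.toList.headD 'A'
    let a0 : Int := (c.toNat : Int) - 65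
    let a1 : Int := if a0 ≥ 9 then a0 - 1 else a0
    let a2 : Int := if a1 ≥ 20 then a1 - 1 else a1
    -- format(a % 32, '05b'): 5 bits, most significant first
    let n : Nat := (PySem.Int.mod a2 32).toNat
    String.mk ([4, 3, 2, 1, 0].map (fun k => if n / 2 ^ k % 2 = 1 then '1' else '0'))
  else ""   -- ord raises TypeError unless len(s) == 1; excluded by Pre_

-- ===== PRECONDITION & SPEC =====
-- Python's ord raises TypeError unless the argument is a single character.
def Pre_baconify (s : String) : Prop := s.toList.length = 1
instance (s : String) : Decidable (Pre_baconify s) := by unfold Pre_baconify; infer_instance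
def pvWitness_baconify : String := "Q"

def Spec_baconify (s : String) (out : String) : Prop := out = baconify_alt s
instance (s : String) (out : String) : Decidable (Spec_baconify s out) := by unfold Spec_baconify; infer_instance

-- ===== CLAIM (what is proved, stated in full; the proofs are below) =====
def Claim_equal_baconify : Prop := ∀ (s : String), Dom_baconify s → Pre_baconify s → Spec_baconify s (baconify s)

-- ===== LEMMAS AND PROOFS =====
-- core equality for every letter value reachable from a domain character
theorem baconify_core (a0 : Int) (hlo : -56 ≤ a0) (hhi : a0 ≤ 61) :
    (let a1 : Int := if a0 ≥ 9 then a0 - 1 else a0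
     let a2 : Int := if a1 ≥ 20 then a1 - 1 else a1
     let st := (List.range 5).foldl
       (fun (st : List Char × Int) _ =>
         (st.1 ++ (PySem.Int.toStr (PySem.Int.mod st.2 2)).toList,
          PySem.Int.floordiv st.2 2)) ([], a2)
     String.mk st.1.reverse)
    =
    (let a1 : Int := if a0 ≥ 9 then a0 - 1 else a0
     let a2 : Int := if a1 ≥ 20 then a1 - 1 else a1
     let n : Nat := (PySem.Int.mod a2 32).toNat
     String.mk ([4, 3, 2, 1, 0].map (fun k => if n / 2 ^ k % 2 = 1 then '1' else '0'))) := by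
  interval_cases a0 <;> decide

-- ===== VERDICT (by name: the statement is the Claim_ definition above) =====
theorem baconify_spec : Claim_equal_baconify := by
  intro s hdom hpre
  unfold Spec_baconify baconify baconify_alt
  cases h : s.toList with
  | nil => simp [Pre_baconify, h] at hpre
  | cons c rest =>
    cases rest with
    | cons d t => simp [Pre_baconify, h] at hpre
    | nil =>
      have hc : pvDomChar c = true := by
        have := hdom
        unfold Dom_baconify pvDomStr at this
        rw [h] at this
        simpa using this
      have hb : 9 ≤ c.toNat ∧ c.toNat ≤ 126 := by
        simp [pvDomChar] at hc
        omega
      simp only [List.length_cons, List.length_nil, List.headD, if_pos rfl]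
      exact baconify_core ((c.toNat : Int) - 65) (by omega) (by omega)
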